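-- pv_equiv track=rewrite | github.com/JozefBelusak/Nurikabe | Nurikabe_BelusakLuc/Nurikabe_BelusakLuc.py | forms_black_loop_partial
-- ===== SOURCE A (Python) =====
-- def forms_black_loop_partial(black_cells):
--     # Overuje, či čierne bunky tvoria cyklus počas čiastočného riešenia.
--     if len(black_cells) < 4:
--         return False
--
--     adj = {cell: [] for cell in black_cells}
--     for (rr, cc) in black_cells:
--         for (dr, dc) in [(1, 0), (-1, 0), (0, 1), (0, -1)]:
--             nr, nc = rr + dr, cc + dc
--             if (nr, nc) in adj:
--                 adj[(rr, cc)].append((nr, nc))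
--
--     visited = set()
--
--     def dfs_cycle(u, parent, depth):
--         visited.add(u)
--         for v in adj[u]:
--             if v not in visited:
--                 if dfs_cycle(v, u, depth + 1):
--                     return True
--             elif v != parent and depth >= 3:
--                 return True
--         return False
--
--     visited_global = set()
--     for cell in black_cells:
--         if cell not in visited_global:
--             visited.clear()
--             if dfs_cycle(cell, None, 0):
--                 return True
--             visited_global.update(visited)
--
--     return False
-- ===== SOURCE B (Python) =====
-- def forms_black_loop_partial(black_cells):
--     # Iterative DFS with an explicit frame stack and a single visited set
--     # (no per-component reset / visited_global bookkeeping).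
--     if len(black_cells) < 4:
--         return False
--
--     adj = {cell: [] for cell in black_cells}
--     for (rr, cc) in black_cells:
--         for (dr, dc) in [(1, 0), (-1, 0), (0, 1), (0, -1)]:
--             nr, nc = rr + dr, cc + dc
--             if (nr, nc) in adj:
--                 adj[(rr, cc)].append((nr, nc))
--
--     visited = set()
--     for start in black_cells:
--         if start in visited:
--             continue
--         visited.add(start)
--         stack = [(start, None, 0, iter(adj[start]))]
--         while stack:
--             u, parent, depth, it = stack[-1]
--             v = next(it, None)
--             if v is None:
--                 stack.pop()
--             elif v not in visited:
--                 visited.add(v)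
--                 stack.append((v, u, depth + 1, iter(adj[v])))
--             elif v != parent and depth >= 3:
--                 return True
--     return False
-- ===== Notes on version B (the rewrite author's own statement) =====
-- stated objective: alternative
-- what changed: Replaces the recursive dfs_cycle and its two sets (per-component visited reset before each start, folded into visited_global) with an iterative DFS driven by an explicit stack of (node, parent, depth, iterator) frames over one single never-cleared visited set; adjacency construction is unchanged.
import Mathlib
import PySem

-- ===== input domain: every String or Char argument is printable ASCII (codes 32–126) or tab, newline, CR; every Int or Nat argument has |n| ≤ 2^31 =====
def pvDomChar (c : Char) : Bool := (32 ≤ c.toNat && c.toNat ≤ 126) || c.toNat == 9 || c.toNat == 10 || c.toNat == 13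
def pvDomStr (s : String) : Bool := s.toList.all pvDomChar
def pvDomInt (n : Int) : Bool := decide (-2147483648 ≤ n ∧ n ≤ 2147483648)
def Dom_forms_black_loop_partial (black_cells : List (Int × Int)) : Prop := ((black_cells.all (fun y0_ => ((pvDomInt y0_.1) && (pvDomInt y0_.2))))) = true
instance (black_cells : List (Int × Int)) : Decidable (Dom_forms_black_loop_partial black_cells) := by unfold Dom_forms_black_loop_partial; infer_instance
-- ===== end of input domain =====

-- B replaces A's recursive per-component DFS (with its per-component `visited` set folded
-- into a separate `visited_global`) by an explicit-stack iterative DFS over one single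
-- visited set; same adjacency construction, same traversal order, same results (alternative
-- decomposition, same asymptotic cost).

-- ===== PORT A =====
def pvDirs : List (Int × Int) := [(1, 0), (-1, 0), (0, 1), (0, -1)]

def pvBuildAdj (black_cells : List (Int × Int)) :
    PySem.Dict (Int × Int) (List (Int × Int)) :=
  let adj0 := black_cells.foldl (fun d c => d.insert c []) PySem.Dict.empty
  black_cells.foldl (fun adj rc =>
    pvDirs.foldl (fun adj dd =>
      if adj.contains (rc.1 + dd.1, rc.2 + dd.2) then
        adj.modify rc [] (fun l => l ++ [(rc.1 + dd.1, rc.2 + dd.2)])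
      else adj) adj) adj0

def pvDfsA (adj : PySem.Dict (Int × Int) (List (Int × Int))) :
    Nat → List (Int × Int) → (Int × Int) → Option (Int × Int) → Int →
    PySem.Set (Int × Int) → Option (Bool × PySem.Set (Int × Int))
  | _, [], _, _, _, vis => some (false, vis)
  | f, v :: vs, u, p, d, vis =>
    if v ∈ vis then
      if p ≠ some v ∧ 3 ≤ d then some (true, vis)
      else pvDfsA adj f vs u p d vis
    else
      match f with
      | 0 => none
      | f' + 1 =>
        match pvDfsA adj f' (adj.getD v []) v (some u) (d + 1) (PySem.Set.add vis v) with
        | none => none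
        | some (true, vis') => some (true, vis')
        | some (false, vis') => pvDfsA adj (f' + 1) vs u p d vis'
termination_by f vs => (f, vs.length)

def pvLoopA (adj : PySem.Dict (Int × Int) (List (Int × Int))) (fuel : Nat) :
    List (Int × Int) → PySem.Set (Int × Int) → Bool
  | [], _ => false
  | c :: cs, g =>
    if c ∈ g then pvLoopA adj fuel cs g
    else
      match pvDfsA adj fuel (adj.getD c []) c none 0 (PySem.Set.add PySem.Set.empty c) with
      | none => false
      | some (true, _) => true
      | some (false, vis) => pvLoopA adj fuel cs (PySem.Set.update g vis)

def forms_black_loop_partial (black_cells : List (Int × Int)) : Bool :=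
  if black_cells.length < 4 then false
  else pvLoopA (pvBuildAdj black_cells) black_cells.length black_cells PySem.Set.empty

-- ===== PORT B =====
-- (pv_countP_lt / pv_filter_add_lt' are cited by pvRunB's decreasing_by, so they precede it)
theorem pv_countP_lt {α : Type} (p q : α → Bool) (h : ∀ x, q x = true → p x = true)
    (v : α) (hp : p v = true) (hq : q v = false) :
    ∀ (l : List α), v ∈ l → l.countP q < l.countP p := by
  intro l hv
  induction l with
  | nil => simp at hv
  | cons a t ih =>
    simp only [List.countP_cons]
    rcases List.mem_cons.mp hv with rfl | hv
    · have hle : t.countP q ≤ t.countP p := List.countP_mono_left (fun x _ => h x)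
      simp [hp, hq]; omega
    · have := ih hv
      have h2 : (if q a = true then 1 else 0) ≤ (if p a = true then 1 else 0) := by
        by_cases hqa : q a = true
        · simp [hqa, h a hqa]
        · simp [hqa]
      omega
theorem pv_filter_add_lt' {α : Type} [BEq α] [LawfulBEq α] [DecidableEq α] (keys : List α) (vis : List α) (v : α)
    (hk : v ∈ keys) (hv : v ∉ vis) :
    (keys.filter (fun k => decide (k ∉ PySem.Set.add vis v))).length <
      (keys.filter (fun k => decide (k ∉ vis))).length := by
  simp only [← List.countP_eq_length_filter]
  apply pv_countP_lt
  · intro x hx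
    simp [PySem.Set.mem_add] at hx ⊢
    exact hx.1
  · simpa using hv
  · simp [PySem.Set.mem_add]
  · exact hk


def pvRunB (adj : PySem.Dict (Int × Int) (List (Int × Int))) :
    List ((Int × Int) × Option (Int × Int) × Int × List (Int × Int)) →
    PySem.Set (Int × Int) → Bool × PySem.Set (Int × Int)
  | [], vis => (false, vis)
  | (_, _, _, []) :: stk, vis => pvRunB adj stk vis
  | (u, p, d, v :: vs) :: stk, vis =>
    if v ∉ vis then
      if adj.contains v then
        pvRunB adj ((v, some u, d + 1, adj.getD v []) :: (u, p, d, vs) :: stk)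
          (PySem.Set.add vis v)
      else pvRunB adj ((u, p, d, vs) :: stk) vis
    else if p ≠ some v ∧ 3 ≤ d then (true, vis)
    else pvRunB adj ((u, p, d, vs) :: stk) vis
termination_by stk vis =>
  ((adj.keys.filter (fun k => decide (k ∉ vis))).length,
    (stk.map (fun fr => fr.2.2.2.length)).sum + stk.length)
decreasing_by
  · simp
    omega
  · rename_i hnv hc
    exact Prod.Lex.left _ _ (pv_filter_add_lt' adj.keys vis v
      ((PySem.Dict.contains_iff_mem_keys _ _).mp hc) hnv)
  · simp
    omega
  · simp
    omega

def pvLoopB (adj : PySem.Dict (Int × Int) (List (Int × Int))) :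
    List (Int × Int) → PySem.Set (Int × Int) → Bool
  | [], _ => false
  | c :: cs, vis =>
    if c ∈ vis then pvLoopB adj cs vis
    else
      match pvRunB adj [(c, none, 0, adj.getD c [])] (PySem.Set.add vis c) with
      | (true, _) => true
      | (false, vis') => pvLoopB adj cs vis'

def forms_black_loop_partial_alt (black_cells : List (Int × Int)) : Bool :=
  if black_cells.length < 4 then false
  else pvLoopB (pvBuildAdj black_cells) black_cells PySem.Set.empty


-- ===== PRECONDITION & SPEC =====
def Spec_forms_black_loop_partial (black_cells : List (Int × Int)) (out : Bool) : Prop := out = forms_black_loop_partial_alt black_cells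
instance (black_cells : List (Int × Int)) (out : Bool) : Decidable (Spec_forms_black_loop_partial black_cells out) := by unfold Spec_forms_black_loop_partial; infer_instance

-- ===== CLAIM (what is proved, stated in full; the proofs are below) =====
def Claim_equal_forms_black_loop_partial : Prop := ∀ (black_cells : List (Int × Int)), Dom_forms_black_loop_partial black_cells → Spec_forms_black_loop_partial black_cells (forms_black_loop_partial black_cells)

-- ===== LEMMAS AND PROOFS =====

theorem pv_dfs_mono (adj : PySem.Dict (Int × Int) (List (Int × Int)))
    (f : Nat) (rest : List (Int × Int)) (u : Int × Int) (p : Option (Int × Int)) (d : Int)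
    (vis : PySem.Set (Int × Int)) (b : Bool) (w : PySem.Set (Int × Int))
    (h : pvDfsA adj f rest u p d vis = some (b, w)) : ∀ x ∈ vis, x ∈ w := by
  fun_induction pvDfsA adj f rest u p d vis generalizing b w
  all_goals simp_all


theorem pv_filter_length_mono {α : Type} [BEq α] [LawfulBEq α] (keys : List α)
    (vis w : List α) (h : ∀ x ∈ vis, x ∈ w) :
    (keys.filter (fun k => decide (k ∉ w))).length ≤
      (keys.filter (fun k => decide (k ∉ vis))).length := by
  simp only [← List.countP_eq_length_filter]
  apply List.countP_mono_left
  intro x _ hx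
  simp at hx ⊢
  intro hmem
  exact hx (h x hmem)

theorem pv_dfs_suf (adj : PySem.Dict (Int × Int) (List (Int × Int)))
    (f : Nat) (rest : List (Int × Int)) (u : Int × Int) (p : Option (Int × Int)) (d : Int)
    (vis : PySem.Set (Int × Int))
    (hgood : ∀ y x, x ∈ adj.getD y [] → adj.contains x = true) :
    (∀ x ∈ rest, adj.contains x = true) →
    (adj.keys.filter (fun k => decide (k ∉ vis))).length < f →
    (pvDfsA adj f rest u p d vis).isSome := by
  fun_induction pvDfsA adj f rest u p d vis with
  | case1 _ _ _ _ => intro _ _; simp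
  | case2 => intro _ _; simp
  | case3 f v vs u p d vis hv hcond ih =>
    intro hrest hf
    exact ih (fun x hx => hrest x (List.mem_cons_of_mem _ hx)) hf
  | case4 v vs u p d vis hv =>
    intro hrest hf
    omega
  | case5 v vs u p d vis hv f' hinner ih1 =>
    intro hrest hf
    have hvk : v ∈ adj.keys :=
      (PySem.Dict.contains_iff_mem_keys _ _).mp (hrest v List.mem_cons_self)
    have hlt := pv_filter_add_lt' adj.keys vis v hvk hv
    have := ih1 (fun x hx => hgood v x hx) (by omega)
    simp [hinner] at this
  | case6 => intro _ _; simp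
  | case7 v vs u p d vis hv f' vis' hinner ih2 ih1 =>
    intro hrest hf
    have hmono := pv_dfs_mono adj f' (adj.getD v []) v (some u) (d+1) (PySem.Set.add vis v)
      false vis' hinner
    have hsub : ∀ x ∈ vis, x ∈ vis' := by
      intro x hx
      exact hmono x (by simp [PySem.Set.mem_add]; exact Or.inl hx)
    have hle := pv_filter_length_mono adj.keys vis vis' hsub
    exact ih1 (fun x hx => hrest x (List.mem_cons_of_mem _ hx)) (lt_of_le_of_lt hle hf)

theorem pv_dfs_sat (adj : PySem.Dict (Int × Int) (List (Int × Int)))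
    (f : Nat) (rest : List (Int × Int)) (u : Int × Int) (p : Option (Int × Int)) (d : Int)
    (vis : PySem.Set (Int × Int)) :
    ∀ w : PySem.Set (Int × Int), pvDfsA adj f rest u p d vis = some (false, w) →
    (∀ v ∈ rest, v ∈ w) ∧ (∀ x, x ∈ w → x ∉ vis → ∀ y ∈ adj.getD x [], y ∈ w) := by
  fun_induction pvDfsA adj f rest u p d vis with
  | case1 _ _ _ _ =>
    intro w h
    simp only [Option.some.injEq, Prod.mk.injEq] at h
    constructor
    · simp
    · intro x hx hnx; rw [← h.2] at hx; exact absurd hx hnx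
  | case2 => intro w h; simp at h
  | case3 f v vs u p d vis hv hcond ih =>
    intro w h
    obtain ⟨h1, h2⟩ := ih w h
    refine ⟨?_, h2⟩
    intro x hx
    rcases List.mem_cons.mp hx with rfl | hx
    · exact pv_dfs_mono adj f vs u p d vis false w h x hv
    · exact h1 x hx
  | case4 => intro w h; simp at h
  | case5 => intro w h; simp at h
  | case6 => intro w h; simp at h
  | case7 v vs u p d vis hv f' vis' hinner ih2 ih1 =>
    intro w h
    obtain ⟨hi1, hi2⟩ := ih2 vis' hinner
    obtain ⟨hc1, hc2⟩ := ih1 w h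
    have hmono1 := pv_dfs_mono adj f' (adj.getD v []) v (some u) (d+1) (PySem.Set.add vis v)
      false vis' hinner
    have hmono2 := pv_dfs_mono adj (f'+1) vs u p d vis' false w h
    have hvw : v ∈ w := hmono2 v (hmono1 v (by simp [PySem.Set.mem_add]))
    constructor
    · intro x hx
      rcases List.mem_cons.mp hx with rfl | hx
      · exact hvw
      · exact hc1 x hx
    · intro x hxw hxv y hy
      by_cases hx' : x ∈ vis'
      · by_cases hxa : x ∈ PySem.Set.add vis v
        · have hxveq : x = v := by
            rcases (PySem.Set.mem_add _ _ _).mp hxa with hmem | rfl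
            · exact absurd hmem hxv
            · rfl
          subst hxveq
          exact hmono2 y (hi1 y hy)
        · exact hmono2 y (hi2 x hx' (by exact hxa) y hy)
      · exact hc2 x hxw hx' y hy

theorem pv_dfs_frame (adj : PySem.Dict (Int × Int) (List (Int × Int)))
    (S : (Int × Int) → Prop)
    (hS : ∀ a b, b ∈ adj.getD a [] → S b → S a)
    (f : Nat) (rest : List (Int × Int)) (u : Int × Int) (p : Option (Int × Int)) (d : Int)
    (vis1 : PySem.Set (Int × Int)) :
    ∀ vis2 : PySem.Set (Int × Int),
    (∀ x ∈ rest, ¬ S x) →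
    (∀ x, x ∈ vis2 ↔ (x ∈ vis1 ∨ S x)) →
    ∀ (b : Bool) (w1 : PySem.Set (Int × Int)),
      pvDfsA adj f rest u p d vis1 = some (b, w1) →
      ∃ w2, pvDfsA adj f rest u p d vis2 = some (b, w2) ∧
        ∀ x, x ∈ w2 ↔ (x ∈ w1 ∨ S x) := by
  fun_induction pvDfsA adj f rest u p d vis1 with
  | case1 _ _ _ _ =>
    intro vis2 hrest hvis b w1 h
    simp only [pvDfsA, Option.some.injEq, Prod.mk.injEq] at h ⊢
    exact ⟨vis2, ⟨h.1, rfl⟩, by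
      intro x; rw [← h.2]; exact hvis x⟩
  | case2 f v vs u p d vis hv hcond =>
    intro vis2 hrest hvis b w1 h
    simp only [Option.some.injEq, Prod.mk.injEq] at h
    have hv2 : v ∈ vis2 := (hvis v).mpr (Or.inl hv)
    refine ⟨vis2, ?_, ?_⟩
    · rw [pvDfsA.eq_def]; dsimp only
      rw [if_pos hv2, if_pos hcond, h.1]
    · intro x; rw [← h.2]; exact hvis x
  | case3 f v vs u p d vis hv hcond ih =>
    intro vis2 hrest hvis b w1 h
    have hv2 : v ∈ vis2 := (hvis v).mpr (Or.inl hv)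
    obtain ⟨w2, hrun, hrel⟩ :=
      ih vis2 (fun x hx => hrest x (List.mem_cons_of_mem _ hx)) hvis b w1 h
    refine ⟨w2, ?_, hrel⟩
    rw [pvDfsA.eq_def]; dsimp only
    rw [if_pos hv2, if_neg hcond]
    exact hrun
  | case4 => intro vis2 hrest hvis b w1 h; simp at h
  | case5 => intro vis2 hrest hvis b w1 h; simp at h
  | case6 v vs u p d vis hv f' vis' hinner ih1 =>
    intro vis2 hrest hvis b w1 h
    simp only [Option.some.injEq, Prod.mk.injEq] at h
    obtain ⟨hb, hw⟩ := h
    subst hb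
    subst hw
    have hSv : ¬ S v := hrest v List.mem_cons_self
    have hv2 : v ∉ vis2 := fun hmem => by
      rcases (hvis v).mp hmem with hm | hm
      · exact hv hm
      · exact hSv hm
    have hrest' : ∀ x ∈ adj.getD v [], ¬ S x := fun x hx hSx => hSv (hS v x hx hSx)
    have hvis' : ∀ x, x ∈ PySem.Set.add vis2 v ↔ (x ∈ PySem.Set.add vis v ∨ S x) := by
      intro x
      rw [PySem.Set.mem_add _ _ _, PySem.Set.mem_add _ _ _]
      constructor
      · rintro (hm | rfl)
        · rcases (hvis x).mp hm with hm' | hm'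
          · exact Or.inl (Or.inl hm')
          · exact Or.inr hm'
        · exact Or.inl (Or.inr rfl)
      · rintro ((hm | rfl) | hm)
        · exact Or.inl ((hvis x).mpr (Or.inl hm))
        · exact Or.inr rfl
        · exact Or.inl ((hvis x).mpr (Or.inr hm))
    obtain ⟨w2, hrun, hrel⟩ := ih1 (PySem.Set.add vis2 v) hrest' hvis' true vis' hinner
    refine ⟨w2, ?_, hrel⟩
    rw [pvDfsA.eq_def]; dsimp only
    rw [if_neg hv2, hrun]
  | case7 v vs u p d vis hv f' vis' hinner ih2 ih1 =>
    intro vis2 hrest hvis b w1 h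
    have hSv : ¬ S v := hrest v List.mem_cons_self
    have hv2 : v ∉ vis2 := fun hmem => by
      rcases (hvis v).mp hmem with hm | hm
      · exact hv hm
      · exact hSv hm
    have hrest' : ∀ x ∈ adj.getD v [], ¬ S x := fun x hx hSx => hSv (hS v x hx hSx)
    have hvis' : ∀ x, x ∈ PySem.Set.add vis2 v ↔ (x ∈ PySem.Set.add vis v ∨ S x) := by
      intro x
      rw [PySem.Set.mem_add _ _ _, PySem.Set.mem_add _ _ _]
      constructor
      · rintro (hm | rfl)
        · rcases (hvis x).mp hm with hm' | hm'
          · exact Or.inl (Or.inl hm')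
          · exact Or.inr hm'
        · exact Or.inl (Or.inr rfl)
      · rintro ((hm | rfl) | hm)
        · exact Or.inl ((hvis x).mpr (Or.inl hm))
        · exact Or.inr rfl
        · exact Or.inl ((hvis x).mpr (Or.inr hm))
    obtain ⟨w2', hrun', hrel'⟩ := ih2 (PySem.Set.add vis2 v) hrest' hvis' false vis' hinner
    obtain ⟨w2, hrun, hrel⟩ :=
      ih1 w2' (fun x hx => hrest x (List.mem_cons_of_mem _ hx)) hrel' b w1 h
    refine ⟨w2, ?_, hrel⟩
    rw [pvDfsA.eq_def]; dsimp only
    rw [if_neg hv2, hrun']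
    exact hrun

theorem pv_sim (adj : PySem.Dict (Int × Int) (List (Int × Int)))
    (hgood : ∀ y x, x ∈ adj.getD y [] → adj.contains x = true)
    (f : Nat) (rest : List (Int × Int)) (u : Int × Int) (p : Option (Int × Int)) (d : Int)
    (vis : PySem.Set (Int × Int)) :
    ∀ stk : List ((Int × Int) × Option (Int × Int) × Int × List (Int × Int)),
    (∀ fr ∈ stk, ∀ x ∈ fr.2.2.2, adj.contains x = true) →
    (∀ x ∈ rest, adj.contains x = true) →
    ∀ (b : Bool) (w : PySem.Set (Int × Int)),
      pvDfsA adj f rest u p d vis = some (b, w) →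
      (b = true → (pvRunB adj ((u, p, d, rest) :: stk) vis).1 = true) ∧
      (b = false → pvRunB adj ((u, p, d, rest) :: stk) vis = pvRunB adj stk w) := by
  fun_induction pvDfsA adj f rest u p d vis with
  | case1 _ _ _ _ =>
    intro stk hstk hrest b w h
    simp only [Option.some.injEq, Prod.mk.injEq] at h
    obtain ⟨hb, hw⟩ := h
    subst hb; subst hw
    constructor
    · intro hcontra; simp at hcontra
    · intro _
      rw [pvRunB.eq_def]
  | case2 f v vs u p d vis hv hcond =>
    intro stk hstk hrest b w h
    simp only [Option.some.injEq, Prod.mk.injEq] at h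
    obtain ⟨hb, hw⟩ := h
    subst hb; subst hw
    constructor
    · intro _
      rw [pvRunB.eq_def]; dsimp only
      rw [if_neg (not_not_intro hv), if_pos hcond]
    · intro hcontra; simp at hcontra
  | case3 f v vs u p d vis hv hcond ih =>
    intro stk hstk hrest b w h
    have hstep : pvRunB adj ((u, p, d, v :: vs) :: stk) vis =
        pvRunB adj ((u, p, d, vs) :: stk) vis := by
      rw [pvRunB.eq_def]; dsimp only
      rw [if_neg (not_not_intro hv), if_neg hcond]
    rw [hstep]
    exact ih stk hstk (fun x hx => hrest x (List.mem_cons_of_mem _ hx)) b w h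
  | case4 => intro stk hstk hrest b w h; simp at h
  | case5 => intro stk hstk hrest b w h; simp at h
  | case6 v vs u p d vis hv f' vis' hinner ih1 =>
    intro stk hstk hrest b w h
    simp only [Option.some.injEq, Prod.mk.injEq] at h
    obtain ⟨hb, hw⟩ := h
    subst hb; subst hw
    have hck : adj.contains v = true := hrest v List.mem_cons_self
    have hstep : pvRunB adj ((u, p, d, v :: vs) :: stk) vis =
        pvRunB adj ((v, some u, d + 1, adj.getD v []) :: (u, p, d, vs) :: stk)
          (PySem.Set.add vis v) := by
      rw [pvRunB.eq_def]; dsimp only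
      rw [if_pos hv, if_pos hck]
    have hstk' : ∀ fr ∈ ((u, p, d, vs) :: stk), ∀ x ∈ fr.2.2.2, adj.contains x = true := by
      intro fr hfr
      rcases List.mem_cons.mp hfr with rfl | hfr
      · exact fun x hx => hrest x (List.mem_cons_of_mem _ hx)
      · exact hstk fr hfr
    have := (ih1 ((u, p, d, vs) :: stk) hstk' (fun x hx => hgood v x hx) true vis' hinner).1 rfl
    constructor
    · intro _; rw [hstep]; exact this
    · intro hcontra; simp at hcontra
  | case7 v vs u p d vis hv f' vis' hinner ih2 ih1 =>
    intro stk hstk hrest b w h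
    have hck : adj.contains v = true := hrest v List.mem_cons_self
    have hstep : pvRunB adj ((u, p, d, v :: vs) :: stk) vis =
        pvRunB adj ((v, some u, d + 1, adj.getD v []) :: (u, p, d, vs) :: stk)
          (PySem.Set.add vis v) := by
      rw [pvRunB.eq_def]; dsimp only
      rw [if_pos hv, if_pos hck]
    have hstk' : ∀ fr ∈ ((u, p, d, vs) :: stk), ∀ x ∈ fr.2.2.2, adj.contains x = true := by
      intro fr hfr
      rcases List.mem_cons.mp hfr with rfl | hfr
      · exact fun x hx => hrest x (List.mem_cons_of_mem _ hx)
      · exact hstk fr hfr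
    have hpop := (ih2 ((u, p, d, vs) :: stk) hstk' (fun x hx => hgood v x hx) false vis' hinner).2 rfl
    have hcont := ih1 stk hstk (fun x hx => hrest x (List.mem_cons_of_mem _ hx)) b w h
    constructor
    · intro hb
      rw [hstep, hpop]
      exact hcont.1 hb
    · intro hb
      rw [hstep, hpop]
      exact hcont.2 hb

def pvStep1 (rc : Int × Int) (adj : PySem.Dict (Int × Int) (List (Int × Int)))
    (dd : Int × Int) : PySem.Dict (Int × Int) (List (Int × Int)) :=
  if adj.contains (rc.1 + dd.1, rc.2 + dd.2) then
    adj.modify rc [] (fun l => l ++ [(rc.1 + dd.1, rc.2 + dd.2)])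
  else adj

theorem pv_build_eq (bc : List (Int × Int)) :
    pvBuildAdj bc = bc.foldl (fun adj rc => pvDirs.foldl (pvStep1 rc) adj)
      (bc.foldl (fun d c => d.insert c []) PySem.Dict.empty) := rfl

theorem pv_step1_contains (rc : Int × Int) (adj : PySem.Dict (Int × Int) (List (Int × Int)))
    (dd : Int × Int) (h : adj.contains rc = true) (k : Int × Int) :
    (pvStep1 rc adj dd).contains k = adj.contains k := by
  unfold pvStep1
  split
  · rw [PySem.Dict.contains_modify]
    by_cases hk : k = rc
    · subst hk; simp [h]
    · simp [hk]
  · rfl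

theorem pv_step1_getD (rc : Int × Int) (adj : PySem.Dict (Int × Int) (List (Int × Int)))
    (dd : Int × Int) (h : adj.contains rc = true) (y x : Int × Int) :
    (x ∈ (pvStep1 rc adj dd).getD y [] ↔
      x ∈ adj.getD y [] ∨
        (y = rc ∧ x = (rc.1 + dd.1, rc.2 + dd.2) ∧ adj.contains x = true)) := by
  unfold pvStep1
  split
  · rename_i hc
    rw [PySem.Dict.getD_modify]
    by_cases hy : y = rc
    · subst hy
      rw [if_pos rfl]
      simp only [List.mem_append, List.mem_singleton]
      constructor
      · rintro (hm | rfl)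
        · exact Or.inl hm
        · exact Or.inr ⟨by trivial, rfl, hc⟩
      · rintro (hm | ⟨-, rfl, -⟩)
        · exact Or.inl hm
        · exact Or.inr rfl
    · rw [if_neg hy]
      constructor
      · exact Or.inl
      · rintro (hm | ⟨rfl, -, -⟩)
        · exact hm
        · exact absurd rfl hy
  · rename_i hc
    constructor
    · exact Or.inl
    · rintro (hm | ⟨rfl, rfl, hx⟩)
      · exact hm
      · exact absurd hx (by simpa using hc)

theorem pv_inner_contains (rc : Int × Int) (ds : List (Int × Int)) :
    ∀ adj : PySem.Dict (Int × Int) (List (Int × Int)), adj.contains rc = true →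
    ∀ k, (ds.foldl (pvStep1 rc) adj).contains k = adj.contains k := by
  induction ds with
  | nil => intro adj _ k; rfl
  | cons dd ds ih =>
    intro adj h k
    simp only [List.foldl_cons]
    rw [ih (pvStep1 rc adj dd) (by rw [pv_step1_contains rc adj dd h]; exact h) k,
      pv_step1_contains rc adj dd h]

theorem pv_inner_getD (rc : Int × Int) (ds : List (Int × Int)) :
    ∀ adj : PySem.Dict (Int × Int) (List (Int × Int)), adj.contains rc = true →
    ∀ y x, (x ∈ (ds.foldl (pvStep1 rc) adj).getD y [] ↔
      x ∈ adj.getD y [] ∨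
        (y = rc ∧ ∃ dd ∈ ds, x = (rc.1 + dd.1, rc.2 + dd.2) ∧ adj.contains x = true)) := by
  induction ds with
  | nil => intro adj _ y x; simp
  | cons dd ds ih =>
    intro adj h y x
    simp only [List.foldl_cons]
    rw [ih (pvStep1 rc adj dd) (by rw [pv_step1_contains rc adj dd h]; exact h) y x,
      pv_step1_getD rc adj dd h y x]
    simp only [pv_step1_contains rc adj dd h, List.mem_cons]
    constructor
    · rintro ((hm | ⟨he, rfl, hx⟩) | ⟨he, dd', hdd', rfl, hx⟩)
      · exact Or.inl hm
      · exact Or.inr ⟨he, dd, Or.inl rfl, rfl, hx⟩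
      · exact Or.inr ⟨he, dd', Or.inr hdd', rfl, hx⟩
    · rintro (hm | ⟨he, dd', hdd', rfl, hx⟩)
      · exact Or.inl (Or.inl hm)
      · rcases hdd' with rfl | hdd'
        · exact Or.inl (Or.inr ⟨he, rfl, hx⟩)
        · exact Or.inr ⟨he, dd', hdd', rfl, hx⟩

theorem pv_step1_keys (rc : Int × Int) (adj : PySem.Dict (Int × Int) (List (Int × Int)))
    (dd : Int × Int) (h : adj.contains rc = true) :
    (pvStep1 rc adj dd).keys = adj.keys := by
  unfold pvStep1
  split
  · rw [PySem.Dict.keys_modify, PySem.Dict.keys_insert_of_contains]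
    exact h
  · rfl

theorem pv_inner_keys (rc : Int × Int) (ds : List (Int × Int)) :
    ∀ adj : PySem.Dict (Int × Int) (List (Int × Int)), adj.contains rc = true →
    (ds.foldl (pvStep1 rc) adj).keys = adj.keys := by
  induction ds with
  | nil => intro adj _; rfl
  | cons dd ds ih =>
    intro adj h
    simp only [List.foldl_cons]
    rw [ih (pvStep1 rc adj dd) (by rw [pv_step1_contains rc adj dd h]; exact h),
      pv_step1_keys rc adj dd h]

theorem pv_outer_keys (cs : List (Int × Int)) :
    ∀ d : PySem.Dict (Int × Int) (List (Int × Int)), (∀ c ∈ cs, d.contains c = true) →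
    (cs.foldl (fun adj rc => pvDirs.foldl (pvStep1 rc) adj) d).keys = d.keys := by
  induction cs with
  | nil => intro d _; rfl
  | cons rc cs ih =>
    intro d h
    simp only [List.foldl_cons]
    have hrc := h rc List.mem_cons_self
    rw [ih (pvDirs.foldl (pvStep1 rc) d)
      (fun c hc => by
        rw [pv_inner_contains rc pvDirs d hrc c]
        exact h c (List.mem_cons_of_mem _ hc)),
      pv_inner_keys rc pvDirs d hrc]

theorem pv_outer_getD (cs : List (Int × Int)) :
    ∀ d : PySem.Dict (Int × Int) (List (Int × Int)), (∀ c ∈ cs, d.contains c = true) →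
    ∀ y x, (x ∈ (cs.foldl (fun adj rc => pvDirs.foldl (pvStep1 rc) adj) d).getD y [] ↔
      x ∈ d.getD y [] ∨
        (y ∈ cs ∧ (∃ dd ∈ pvDirs, x = (y.1 + dd.1, y.2 + dd.2)) ∧ d.contains x = true)) := by
  induction cs with
  | nil => intro d _ y x; simp
  | cons rc cs ih =>
    intro d h y x
    simp only [List.foldl_cons]
    have hrc := h rc List.mem_cons_self
    rw [ih (pvDirs.foldl (pvStep1 rc) d)
      (fun c hc => by
        rw [pv_inner_contains rc pvDirs d hrc c]
        exact h c (List.mem_cons_of_mem _ hc)),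
      pv_inner_getD rc pvDirs d hrc y x]
    simp only [pv_inner_contains rc pvDirs d hrc, List.mem_cons]
    constructor
    · rintro ((hm | ⟨he, dd, hdd, rfl, hx⟩) | ⟨hy, ⟨dd, hdd, rfl⟩, hx⟩)
      · exact Or.inl hm
      · exact Or.inr ⟨Or.inl he, ⟨dd, hdd, by rw [he]⟩, by rw [← he] at hx ⊢; exact hx⟩
      · exact Or.inr ⟨Or.inr hy, ⟨dd, hdd, rfl⟩, hx⟩
    · rintro (hm | ⟨hy, ⟨dd, hdd, rfl⟩, hx⟩)
      · exact Or.inl (Or.inl hm)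
      · rcases hy with rfl | hy
        · exact Or.inl (Or.inr ⟨rfl, dd, hdd, rfl, hx⟩)
        · exact Or.inr ⟨hy, ⟨dd, hdd, rfl⟩, hx⟩

theorem pv_adj0_getD (bc : List (Int × Int)) :
    ∀ e : PySem.Dict (Int × Int) (List (Int × Int)), (∀ y, e.getD y [] = []) →
    ∀ y, (bc.foldl (fun d c => d.insert c []) e).getD y [] = [] := by
  induction bc with
  | nil => intro e he y; exact he y
  | cons c cs ih =>
    intro e he y
    simp only [List.foldl_cons]
    refine ih (e.insert c []) (fun z => ?_) y
    rw [PySem.Dict.getD_insert]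
    split
    · rfl
    · exact he z

theorem pv_adj0_keys (bc : List (Int × Int)) :
    (bc.foldl (fun d c => d.insert c []) PySem.Dict.empty :
      PySem.Dict (Int × Int) (List (Int × Int))).keys = PySem.Set.ofList bc := by
  have h := PySem.Dict.keys_foldl_insert (ν := List (Int × Int)) bc
    (fun _ _ => []) PySem.Dict.empty
  rw [h, PySem.Dict.keys_empty]
  rfl

theorem pv_adj0_contains (bc : List (Int × Int)) (k : Int × Int) :
    (bc.foldl (fun d c => d.insert c []) PySem.Dict.empty :
      PySem.Dict (Int × Int) (List (Int × Int))).contains k = true ↔ k ∈ bc := by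
  rw [PySem.Dict.contains_iff_mem_keys, pv_adj0_keys, PySem.Set.mem_ofList]

theorem pv_build_keys (bc : List (Int × Int)) :
    (pvBuildAdj bc).keys = PySem.Set.ofList bc := by
  rw [pv_build_eq]
  rw [pv_outer_keys bc _ (fun c hc => (pv_adj0_contains bc c).mpr hc)]
  exact pv_adj0_keys bc

theorem pv_build_contains (bc : List (Int × Int)) (k : Int × Int) :
    (pvBuildAdj bc).contains k = true ↔ k ∈ bc := by
  rw [PySem.Dict.contains_iff_mem_keys, pv_build_keys, PySem.Set.mem_ofList]

theorem pv_adj_char (bc : List (Int × Int)) (y x : Int × Int) :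
    x ∈ (pvBuildAdj bc).getD y [] ↔
      y ∈ bc ∧ (∃ dd ∈ pvDirs, x = (y.1 + dd.1, y.2 + dd.2)) ∧ x ∈ bc := by
  rw [pv_build_eq]
  rw [pv_outer_getD bc _ (fun c hc => (pv_adj0_contains bc c).mpr hc) y x]
  rw [pv_adj0_getD bc _ (fun z => PySem.Dict.getD_empty z []) y]
  simp only [List.not_mem_nil, false_or]
  constructor
  · rintro ⟨hy, hdd, hx⟩
    exact ⟨hy, hdd, (pv_adj0_contains bc x).mp hx⟩
  · rintro ⟨hy, hdd, hx⟩
    exact ⟨hy, hdd, (pv_adj0_contains bc x).mpr hx⟩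

theorem pv_adj_good (bc : List (Int × Int)) :
    ∀ y x, x ∈ (pvBuildAdj bc).getD y [] → (pvBuildAdj bc).contains x = true := by
  intro y x hx
  exact (pv_build_contains bc x).mpr ((pv_adj_char bc y x).mp hx).2.2

theorem pv_adj_sym (bc : List (Int × Int)) (y x : Int × Int)
    (h : x ∈ (pvBuildAdj bc).getD y []) : y ∈ (pvBuildAdj bc).getD x [] := by
  rw [pv_adj_char] at h ⊢
  obtain ⟨hy, ⟨dd, hdd, rfl⟩, hx⟩ := h
  refine ⟨hx, ⟨(-dd.1, -dd.2), ?_, ?_⟩, hy⟩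
  · simp only [pvDirs, List.mem_cons, List.not_mem_nil, or_false] at hdd ⊢
    rcases hdd with rfl | rfl | rfl | rfl <;> simp
  · simp

theorem pv_loop_eq (bc : List (Int × Int)) :
    ∀ (cs : List (Int × Int)) (g visB : PySem.Set (Int × Int)),
    (∀ c ∈ cs, c ∈ bc) →
    (∀ x, x ∈ visB ↔ x ∈ g) →
    (∀ a b : Int × Int, b ∈ (pvBuildAdj bc).getD a [] → b ∈ g → a ∈ g) →
    pvLoopA (pvBuildAdj bc) bc.length cs g = pvLoopB (pvBuildAdj bc) cs visB := by
  intro cs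
  induction cs with
  | nil => intro g visB _ _ _; rfl
  | cons c cs ih =>
    intro g visB hcs hinv hclo
    by_cases hcg : c ∈ g
    · have hcv : c ∈ visB := (hinv c).mpr hcg
      simp only [pvLoopA, pvLoopB, if_pos hcg, if_pos hcv]
      exact ih g visB (fun z hz => hcs z (List.mem_cons_of_mem _ hz)) hinv hclo
    · have hcv : c ∉ visB := fun hm => hcg ((hinv c).mp hm)
      have hcb : c ∈ bc := hcs c List.mem_cons_self
      have hgood := pv_adj_good bc
      -- fuel sufficiency for the component run
      have hkc : c ∈ (pvBuildAdj bc).keys := by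
        rw [pv_build_keys]; exact (PySem.Set.mem_ofList _ _).mpr hcb
      have hcount : ((pvBuildAdj bc).keys.filter
          (fun k => decide (k ∉ PySem.Set.add PySem.Set.empty c))).length < bc.length := by
        have h1 : ((pvBuildAdj bc).keys.filter
            (fun k => decide (k ∉ PySem.Set.add PySem.Set.empty c))).length <
            (pvBuildAdj bc).keys.length := by
          rw [← List.countP_eq_length_filter]
          have := pv_countP_lt (fun _ => true)
            (fun k => decide (k ∉ PySem.Set.add PySem.Set.empty c))
            (fun x _ => rfl) c rfl (by simp [PySem.Set.add]) (pvBuildAdj bc).keys hkc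
          calc ((pvBuildAdj bc).keys.countP
              (fun k => decide (k ∉ PySem.Set.add PySem.Set.empty c)))
              < (pvBuildAdj bc).keys.countP (fun _ => true) := this
            _ = (pvBuildAdj bc).keys.length := by simp
        have h2 : (pvBuildAdj bc).keys.length ≤ bc.length := by
          rw [pv_build_keys]; exact PySem.Set.length_ofList_le bc
        omega
      have hrestk : ∀ x ∈ (pvBuildAdj bc).getD c [], (pvBuildAdj bc).contains x = true :=
        fun x hx => hgood c x hx
      have hsome := pv_dfs_suf (pvBuildAdj bc) bc.length ((pvBuildAdj bc).getD c []) c none 0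
        (PySem.Set.add PySem.Set.empty c) hgood hrestk hcount
      obtain ⟨⟨b, w1⟩, h1⟩ : ∃ r, pvDfsA (pvBuildAdj bc) bc.length ((pvBuildAdj bc).getD c [])
          c none 0 (PySem.Set.add PySem.Set.empty c) = some r :=
        Option.isSome_iff_exists.mp hsome
      -- frame: move to the global visited set of B
      have hrestS : ∀ x ∈ (pvBuildAdj bc).getD c [], ¬ x ∈ g :=
        fun x hx hxg => hcg (hclo c x hx hxg)
      have hvis2 : ∀ x, x ∈ PySem.Set.add visB c ↔
          (x ∈ PySem.Set.add PySem.Set.empty c ∨ x ∈ g) := by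
        intro x
        rw [PySem.Set.mem_add _ _ _, PySem.Set.mem_add _ _ _]
        constructor
        · rintro (hm | rfl)
          · exact Or.inr ((hinv x).mp hm)
          · exact Or.inl (Or.inr rfl)
        · rintro ((hm | rfl) | hm)
          · simp [PySem.Set.empty] at hm
          · exact Or.inr rfl
          · exact Or.inl ((hinv x).mpr hm)
      obtain ⟨w2, h2, hrel⟩ := pv_dfs_frame (pvBuildAdj bc) (fun z => z ∈ g) hclo
        bc.length ((pvBuildAdj bc).getD c []) c none 0
        (PySem.Set.add PySem.Set.empty c) (PySem.Set.add visB c) hrestS hvis2 b w1 h1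
      -- simulate B's stack run from the dfs on B's visited set
      have hsim := pv_sim (pvBuildAdj bc) hgood bc.length ((pvBuildAdj bc).getD c []) c none 0
        (PySem.Set.add visB c) [] (by simp) hrestk b w2 h2
      cases b with
      | true =>
        have hrun1 : (pvRunB (pvBuildAdj bc)
            [(c, none, 0, (pvBuildAdj bc).getD c [])] (PySem.Set.add visB c)).1 = true :=
          hsim.1 rfl
        simp only [pvLoopA, pvLoopB, if_neg hcg, if_neg hcv, h1]
        rcases hr : pvRunB (pvBuildAdj bc)
            [(c, none, 0, (pvBuildAdj bc).getD c [])] (PySem.Set.add visB c) with ⟨r1, r2⟩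
        rw [hr] at hrun1
        simp only at hrun1
        subst hrun1
        rfl
      | false =>
        have hrun : pvRunB (pvBuildAdj bc)
            [(c, none, 0, (pvBuildAdj bc).getD c [])] (PySem.Set.add visB c) =
            (false, w2) := by
          rw [hsim.2 rfl]
          rw [pvRunB.eq_def]
        simp only [pvLoopA, pvLoopB, if_neg hcg, if_neg hcv, h1, hrun]
        -- recurse: new invariants
        have hsat := pv_dfs_sat (pvBuildAdj bc) bc.length ((pvBuildAdj bc).getD c []) c none 0
          (PySem.Set.add PySem.Set.empty c) w1 h1
        refine ih (PySem.Set.update g w1) w2 (fun z hz => hcs z (List.mem_cons_of_mem _ hz))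
          ?_ ?_
        · intro x
          rw [PySem.Set.mem_update _ _ _]
          rw [hrel x]
          tauto
        · intro a b hab hbg
          rw [PySem.Set.mem_update _ _ _] at hbg ⊢
          rcases hbg with hbg | hbw
          · exact Or.inl (hclo a b hab hbg)
          · right
            have hba := pv_adj_sym bc a b hab
            by_cases hbc : b ∈ PySem.Set.add PySem.Set.empty c
            · have : b = c := by
                rcases (PySem.Set.mem_add _ _ _).mp hbc with hm | rfl
                · simp [PySem.Set.empty] at hm
                · rfl
              subst this
              exact hsat.1 a hba
            · exact hsat.2 b hbw hbc a hba

theorem pv_main (bc : List (Int × Int)) :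
    forms_black_loop_partial bc = forms_black_loop_partial_alt bc := by
  unfold forms_black_loop_partial forms_black_loop_partial_alt
  by_cases h : bc.length < 4
  · rw [if_pos h, if_pos h]
  · rw [if_neg h, if_neg h]
    exact pv_loop_eq bc bc PySem.Set.empty PySem.Set.empty (fun c hc => hc)
      (fun x => Iff.rfl) (fun a b _ hb => absurd hb (List.not_mem_nil))

-- ===== VERDICT (by name: the statement is the Claim_ definition above) =====
theorem forms_black_loop_partial_spec : Claim_equal_forms_black_loop_partial := by
  intro black_cells _
  unfold Spec_forms_black_loop_partial
  exact pv_main black_cells
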